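-- pv_equiv track=rewrite | github.com/aisecco/machinemind | tools/datasort.py | getSortType_fastd
-- ===== SOURCE A (Python) =====
-- def getSortType_fastd(lst):
--     ordertype = 0
--     it = iter(lst)
--     try:
--         prev = it.__next__()
--     except StopIteration:
--         # return True
--         ordertype = 1
--     for cur in it:
--         if prev > cur:
--             if ordertype == 0 or ordertype == 2:
--                 ordertype = 2
--             else:
--                 ordertype = 1
--             # return False
--         if prev < cur:
--             if ordertype == 0 or ordertype == 3:
--                 ordertype = 3
--             else:
--                 ordertype = 1
--         prev = cur
--     return ordertype
-- ===== SOURCE B (Python) =====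
-- def getSortType_fastd(lst):
--     if not lst:
--         return 1
--     has_inc = any(a < b for a, b in zip(lst, lst[1:]))
--     has_dec = any(a > b for a, b in zip(lst, lst[1:]))
--     if has_dec:
--         return 1 if has_inc else 2
--     return 3 if has_inc else 0
-- ===== Notes on version B (the rewrite author's own statement) =====
-- stated objective: simpler
-- what changed: Replaces the incremental 4-state transition fold with an aggregate-then-classify decomposition: compute two booleans (any ascent, any descent) over adjacent pairs and map the flag pair to the code.
import Mathlib
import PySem

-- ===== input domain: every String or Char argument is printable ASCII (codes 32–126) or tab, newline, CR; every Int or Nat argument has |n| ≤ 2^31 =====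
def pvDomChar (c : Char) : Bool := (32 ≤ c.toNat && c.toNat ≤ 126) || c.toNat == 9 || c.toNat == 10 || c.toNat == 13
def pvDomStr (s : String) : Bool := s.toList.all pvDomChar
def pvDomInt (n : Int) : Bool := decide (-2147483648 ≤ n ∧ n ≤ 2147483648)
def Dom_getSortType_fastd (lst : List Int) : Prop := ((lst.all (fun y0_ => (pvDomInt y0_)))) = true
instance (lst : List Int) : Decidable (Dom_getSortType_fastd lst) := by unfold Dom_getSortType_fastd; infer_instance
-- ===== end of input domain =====

-- B replaces A's 4-state transition fold by two aggregate flags (any ascent / any descent)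
-- over adjacent pairs, classified at the end; same result, simpler decomposition.

-- ===== PORT A =====
-- the for-loop over the iterator tail, carrying (ordertype, prev)
def getSortType_fastd_loop (ot : Int) (prev : Int) : List Int → Int
  | [] => ot
  | cur :: rest =>
    let ot1 := if prev > cur then (if ot = 0 ∨ ot = 2 then 2 else 1) else ot
    let ot2 := if prev < cur then (if ot1 = 0 ∨ ot1 = 3 then 3 else 1) else ot1
    getSortType_fastd_loop ot2 cur rest

def getSortType_fastd (lst : List Int) : Int :=
  match lst with
  | [] => 1            -- StopIteration branch: ordertype = 1
  | prev :: rest => getSortType_fastd_loop 0 prev rest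

-- ===== PORT B =====
def getSortType_fastd_alt (lst : List Int) : Int :=
  match lst with
  | [] => 1
  | _ :: _ =>
    let pairs := lst.zip lst.tail
    let hasInc := pairs.any (fun p => p.1 < p.2)
    let hasDec := pairs.any (fun p => p.1 > p.2)
    if hasDec then (if hasInc then 1 else 2) else (if hasInc then 3 else 0)

-- ===== PRECONDITION & SPEC =====
def Spec_getSortType_fastd (lst : List Int) (out : Int) : Prop := out = getSortType_fastd_alt lst
instance (lst : List Int) (out : Int) : Decidable (Spec_getSortType_fastd lst out) := by unfold Spec_getSortType_fastd; infer_instance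

-- ===== CLAIM (what is proved, stated in full; the proofs are below) =====
def Claim_equal_getSortType_fastd : Prop := ∀ (lst : List Int), Dom_getSortType_fastd lst → Spec_getSortType_fastd lst (getSortType_fastd lst)

-- ===== LEMMAS AND PROOFS =====

-- encoding of A's ordertype state by the two flags B maintains
def pvCls (d i : Bool) : Int := if d then (if i then 1 else 2) else (if i then 3 else 0)

theorem getSortType_fastd_loop_cls (rest : List Int) : ∀ (d i : Bool) (prev : Int),
    getSortType_fastd_loop (pvCls d i) prev rest =
      pvCls (d || ((prev :: rest).zip rest).any (fun p => p.1 > p.2))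
            (i || ((prev :: rest).zip rest).any (fun p => p.1 < p.2)) := by
  induction rest with
  | nil => intro d i prev; simp [getSortType_fastd_loop]
  | cons cur rest ih =>
    intro d i prev
    have step : getSortType_fastd_loop (pvCls d i) prev (cur :: rest) =
        getSortType_fastd_loop (pvCls (d || decide (prev > cur)) (i || decide (prev < cur))) cur rest := by
      simp only [getSortType_fastd_loop]
      congr 1
      cases d <;> cases i <;> simp [pvCls] <;> split_ifs <;> simp_all <;> omega
    rw [step, ih]
    simp [List.any_cons, Bool.or_assoc]
theorem getSortType_fastd_spec : Claim_equal_getSortType_fastd := by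
  intro lst _
  unfold Spec_getSortType_fastd
  cases lst with
  | nil => rfl
  | cons prev rest =>
    show getSortType_fastd_loop 0 prev rest = _
    have h0 : (0 : Int) = pvCls false false := rfl
    rw [h0, getSortType_fastd_loop_cls]
    simp only [getSortType_fastd_alt, pvCls, Bool.false_or, List.tail_cons]
    rfl
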